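-- pv_equiv track=rewrite | github.com/jesnaaugustine/DSA | strivers_recursion.py | combination_sum_rep
-- ===== SOURCE A (Python) =====
-- def combination_sum_rep(arr,target):
--     ans =[]
--     def inner(ind,s,new):
--         if s==target:
--             ans.append(new[:])
--             return
--         if ind==len(arr) or s>target:
--             return
--         for i in range(ind,len(arr)):
--             new.append(arr[i])
--             s+=arr[i]
--             inner(i,s,new)
--             new.pop()
--             s-=arr[i]
--     inner(0,0,[])
--     return ans
-- ===== SOURCE B (Python) =====
-- def combination_sum_rep(arr, target):
--     # include/exclude (pick / not-pick) binary recursion instead of A's for-loop backtracking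
--     ans = []
--     new = []
--
--     def inner(ind, s):
--         if s == target:
--             ans.append(new[:])
--             return
--         if ind == len(arr) or s > target:
--             return
--         # include arr[ind] (may reuse the same index)
--         new.append(arr[ind])
--         inner(ind, s + arr[ind])
--         new.pop()
--         # exclude arr[ind]
--         inner(ind + 1, s)
--
--     inner(0, 0)
--     return ans
-- ===== Notes on version B (the rewrite author's own statement) =====
-- stated objective: alternative
-- what changed: A's inner backtracking for-loop over indices i in range(ind, len(arr)) is replaced by include/exclude (pick / not-pick) binary recursion on a single index, include first so the output order is identical.
import Mathlib
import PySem

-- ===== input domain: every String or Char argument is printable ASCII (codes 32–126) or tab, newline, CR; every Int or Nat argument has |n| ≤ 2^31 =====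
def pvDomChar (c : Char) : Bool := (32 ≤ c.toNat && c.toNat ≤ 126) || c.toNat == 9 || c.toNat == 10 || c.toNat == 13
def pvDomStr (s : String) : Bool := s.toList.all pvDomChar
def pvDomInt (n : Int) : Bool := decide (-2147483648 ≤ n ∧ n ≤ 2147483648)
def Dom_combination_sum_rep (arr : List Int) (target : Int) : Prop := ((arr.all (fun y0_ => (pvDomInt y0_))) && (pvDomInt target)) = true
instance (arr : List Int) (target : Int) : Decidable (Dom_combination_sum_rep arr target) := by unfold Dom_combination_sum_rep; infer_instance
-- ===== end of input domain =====

-- B replaces A's index for-loop backtracking by include/exclude binary recursion (objective: alternative, same cost).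
-- Both ports carry a fuel argument purely as a totality guard: on every input satisfying
-- Pre_combination_sum_rep the fuel target.toNat + arr.length + 1 is never exhausted
-- (recursion depth ≤ target.toNat + 1 includes plus ≤ arr.length index steps).

-- ===== PORT A =====
-- inner(ind, s, new): the Python closure; `ans` is threaded as an accumulator, and since the
-- Python restores `new` by pop after each recursive call, `new` is passed functionally.
mutual
def innerA (arr : List Int) (target : Int) : Nat → Nat → Int → List Int → List (List Int) → List (List Int)
  | 0, _, _, _, ans => ans      -- fuel guard only; unreachable on Pre_ inputs
  | fuel+1, ind, s, new, ans =>
    if s = target then ans ++ [new]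
    else if ind = arr.length ∨ target < s then ans
    else loopA arr target fuel ind s new ans
  termination_by f _ _ _ _ => (f, 0, 0)
  decreasing_by simp_wf; exact Prod.Lex.left _ _ (by omega)
-- the `for i in range(ind, len(arr))` loop of A's inner
def loopA (arr : List Int) (target : Int) : Nat → Nat → Int → List Int → List (List Int) → List (List Int)
  | fuel, i, s, new, ans =>
    if _h : i < arr.length then
      loopA arr target fuel (i+1) s new
        (innerA arr target fuel i (s + arr.getD i 0) (new ++ [arr.getD i 0]) ans)  -- arr[i], i < len here
    else ans
  termination_by f i _ _ _ => (f, arr.length - i, 1)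
  decreasing_by all_goals exact Prod.Lex.right _ (Prod.Lex.left _ _ (by omega))
end

def combination_sum_rep (arr : List Int) (target : Int) : List (List Int) :=
  innerA arr target (target.toNat + arr.length + 1) 0 0 [] []

-- ===== PORT B =====
-- inner(ind, s): include arr[ind] first (same index), then exclude (ind+1)
def innerB (arr : List Int) (target : Int) : Nat → Nat → Int → List Int → List (List Int) → List (List Int)
  | 0, _, _, _, ans => ans      -- fuel guard only; unreachable on Pre_ inputs
  | fuel+1, ind, s, new, ans =>
    if s = target then ans ++ [new]
    else if ind = arr.length ∨ target < s then ans
    else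
      innerB arr target fuel (ind+1) s new
        (innerB arr target fuel ind (s + arr.getD ind 0) (new ++ [arr.getD ind 0]) ans)  -- arr[ind], ind < len here

def combination_sum_rep_alt (arr : List Int) (target : Int) : List (List Int) :=
  innerB arr target (target.toNat + arr.length + 1) 0 0 [] []

-- ===== PRECONDITION & SPEC =====
-- Pre_ excludes exactly the inputs on which Python A never returns (RecursionError): a positive
-- target together with a nonempty arr containing a non-positive element makes inner recurse forever.
def Pre_combination_sum_rep (arr : List Int) (target : Int) : Prop :=
  target ≤ 0 ∨ arr = [] ∨ ∀ x ∈ arr, 0 < x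
instance (arr : List Int) (target : Int) : Decidable (Pre_combination_sum_rep arr target) := by
  unfold Pre_combination_sum_rep; infer_instance

def pvWitness_combination_sum_rep : List Int × Int := ([2, 3, 5], 8)

def Spec_combination_sum_rep (arr : List Int) (target : Int) (out : List (List Int)) : Prop := out = combination_sum_rep_alt arr target
instance (arr : List Int) (target : Int) (out : List (List Int)) : Decidable (Spec_combination_sum_rep arr target out) := by unfold Spec_combination_sum_rep; infer_instance

-- ===== CLAIM (what is proved, stated in full; the proofs are below) =====
def Claim_equal_combination_sum_rep : Prop := ∀ (arr : List Int) (target : Int), Dom_combination_sum_rep arr target → Pre_combination_sum_rep arr target → Spec_combination_sum_rep arr target (combination_sum_rep arr target)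

-- ===== LEMMAS AND PROOFS =====

-- Main equivalence: strong induction on the measure μ(ind,s) = (target-s).toNat + (len-ind).
-- First component: innerA = innerB given enough fuel; second: A's loop from j equals innerB at j.
theorem key (arr : List Int) (target : Int) (hpos : ∀ x ∈ arr, 0 < x) :
    ∀ k : Nat,
      (∀ ind s new ans f1 f2, ind ≤ arr.length →
        (target - s).toNat + (arr.length - ind) ≤ k →
        (target - s).toNat + (arr.length - ind) < f1 →
        (target - s).toNat + (arr.length - ind) < f2 →
        innerA arr target f1 ind s new ans = innerB arr target f2 ind s new ans)
      ∧
      (∀ j s new ans f1 f2, j ≤ arr.length → s ≠ target → ¬ target < s →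
        (target - s).toNat + (arr.length - j) ≤ k →
        (target - s).toNat + (arr.length - j) ≤ f1 →
        (target - s).toNat + (arr.length - j) < f2 →
        loopA arr target f1 j s new ans = innerB arr target f2 j s new ans) := by
  intro k
  induction k using Nat.strong_induction_on with
  | _ k IH =>
    have hQ : ∀ j s new ans f1 f2, j ≤ arr.length → s ≠ target → ¬ target < s →
        (target - s).toNat + (arr.length - j) ≤ k →
        (target - s).toNat + (arr.length - j) ≤ f1 →
        (target - s).toNat + (arr.length - j) < f2 →
        loopA arr target f1 j s new ans = innerB arr target f2 j s new ans := by
      intro j s new ans f1 f2 hj hs hle hk hf1 hf2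
      have hslt : s < target := lt_of_le_of_ne (not_lt.mp hle) hs
      have hμ1 : 1 ≤ (target - s).toNat := by omega
      obtain ⟨g2, rfl⟩ : ∃ g2, f2 = g2 + 1 := ⟨f2 - 1, by omega⟩
      by_cases hjl : j < arr.length
      · have ha : arr.getD j 0 ∈ arr := by
          rw [List.getD_eq_getElem arr 0 hjl]; exact List.getElem_mem hjl
        have hap : 0 < arr.getD j 0 := hpos _ ha
        set a := arr.getD j 0 with hadef
        have hμ' : (target - (s + a)).toNat + (arr.length - j)
            < (target - s).toNat + (arr.length - j) := by omega
        rw [loopA, dif_pos hjl, innerB, if_neg hs, if_neg (not_or.mpr ⟨by omega, hle⟩)]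
        have hinc := (IH ((target - (s + a)).toNat + (arr.length - j)) (by omega)).1
          j (s + a) (new ++ [a]) ans f1 g2 (le_of_lt hjl) (le_refl _) (by omega) (by omega)
        rw [hinc]
        exact (IH ((target - s).toNat + (arr.length - (j+1))) (by omega)).2
          (j+1) s new _ f1 g2 (by omega) hs hle (le_refl _) (by omega) (by omega)
      · have hje : j = arr.length := by omega
        rw [loopA, dif_neg hjl, innerB, if_neg hs, if_pos (Or.inl hje)]
    refine ⟨?_, hQ⟩
    intro ind s new ans f1 f2 hind hk h1 h2
    obtain ⟨g1, rfl⟩ : ∃ g1, f1 = g1 + 1 := ⟨f1 - 1, by omega⟩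
    obtain ⟨g2, rfl⟩ : ∃ g2, f2 = g2 + 1 := ⟨f2 - 1, by omega⟩
    rw [innerA, innerB]
    by_cases hs : s = target
    · rw [if_pos hs, if_pos hs]
    · rw [if_neg hs, if_neg hs]
      by_cases hb : ind = arr.length ∨ target < s
      · rw [if_pos hb, if_pos hb]
      · rw [if_neg hb]
        rw [not_or] at hb
        have : loopA arr target g1 ind s new ans = innerB arr target (g2+1) ind s new ans :=
          hQ ind s new ans g1 (g2+1) hind hs hb.2 hk (by omega) (by omega)
        rw [this, innerB, if_neg hs, if_neg (not_or.mpr hb)]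

-- ===== VERDICT (by name: the statement is the Claim_ definition above) =====
theorem combination_sum_rep_spec : Claim_equal_combination_sum_rep := by
  intro arr target _ hpre
  unfold Spec_combination_sum_rep combination_sum_rep combination_sum_rep_alt
  rcases hpre with hle | hnil | hpos
  · -- target ≤ 0: both recursions stop at the first call
    rw [innerA, innerB]
    by_cases h0 : (0:Int) = target
    · rw [if_pos h0, if_pos h0]
    · rw [if_neg h0, if_neg h0, if_pos (Or.inr (by omega)), if_pos (Or.inr (by omega))]
  · -- arr = []: every element is (vacuously) positive
    exact (key arr target (by simp [hnil]) (target.toNat + arr.length) ).1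
      0 0 [] [] _ _ (by omega) (by omega) (by omega) (by omega)
  · exact (key arr target hpos (target.toNat + arr.length)).1
      0 0 [] [] _ _ (by omega) (by omega) (by omega) (by omega)
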